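-- pv_equiv track=rewrite | github.com/CantorHu/NaivePalindrome | NaivePalindrome.py | trans2num
-- ===== SOURCE A (Python) =====
-- def trans2num(radix,number):
--     """回文数转为十进制"""
--     strlen=len(number)
--     di_num=0
--     for i in range(strlen):
--         if number[i]>='a' and number[i]<'z':
--             rad_num=getradnum(number[i])
--         else: rad_num=int(number[i])
--         di_num+=rad_num*pow(radix,strlen-1-i)
--     return di_num
--
-- def getradnum(rad_str):
--     """得到位数对应的数字"""
--     if rad_str=='a':return 10
--     elif rad_str=='b':return 11
--     elif rad_str=='c':return 12
--     elif rad_str=='d':return 13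
--     elif rad_str=='e':return 14
--     elif rad_str=='f':return 15
--     elif rad_str=='g':return 16
--     elif rad_str=='h':return 17
--     elif rad_str=='i':return 18
--     elif rad_str=='j':return 19
-- ===== SOURCE B (Python) =====
-- def trans2num(radix, number):
--     """回文数转为十进制 — Horner's method: one pass, no pow()"""
--     di_num = 0
--     for c in number:
--         di_num = di_num * radix + (ord(c) - 48 if c <= '9' else ord(c) - 87)
--     return di_num
-- ===== Notes on version B (the rewrite author's own statement) =====
-- stated objective: faster
-- what changed: Replaces the per-digit pow(radix, strlen-1-i) loop (quadratic bigint work) and the if-chain digit table by a single Horner pass accumulating di_num*radix + digit computed arithmetically from ord(c).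
import Mathlib
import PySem

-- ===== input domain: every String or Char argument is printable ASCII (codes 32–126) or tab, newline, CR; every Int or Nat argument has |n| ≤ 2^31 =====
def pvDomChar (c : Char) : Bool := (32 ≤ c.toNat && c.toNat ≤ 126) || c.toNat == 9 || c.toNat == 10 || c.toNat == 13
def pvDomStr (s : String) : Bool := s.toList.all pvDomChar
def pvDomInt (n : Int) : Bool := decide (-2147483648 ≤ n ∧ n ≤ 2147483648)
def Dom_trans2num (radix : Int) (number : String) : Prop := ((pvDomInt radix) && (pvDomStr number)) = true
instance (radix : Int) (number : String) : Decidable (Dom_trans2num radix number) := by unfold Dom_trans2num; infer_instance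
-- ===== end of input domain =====

-- B replaces A's per-digit pow(radix, strlen-1-i) with a single Horner pass (di_num*radix + digit).

-- ===== PORT A =====
-- getradnum: Python returns None for chars other than 'a'..'j' (then rad_num*pow raises TypeError);
-- those inputs are outside Pre_, the port returns 0 there.
def getradnum (rad_str : Char) : Int :=
  if rad_str = 'a' then 10
  else if rad_str = 'b' then 11
  else if rad_str = 'c' then 12
  else if rad_str = 'd' then 13
  else if rad_str = 'e' then 14
  else if rad_str = 'f' then 15
  else if rad_str = 'g' then 16
  else if rad_str = 'h' then 17
  else if rad_str = 'i' then 18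
  else if rad_str = 'j' then 19
  else 0

def trans2num (radix : Int) (number : String) : Int :=
  let cs := number.toList
  let strlen : Int := cs.length
  (PySem.List.pyRange 0 strlen 1).foldl
    (fun di_num i =>
      let c := PySem.List.pyGetD cs i ' '
      -- int(number[i]) raises ValueError on non-digit chars: outside Pre_, port uses .getD 0 there
      let rad_num := if 'a' ≤ c ∧ c < 'z' then getradnum c
                     else (PySem.Int.ofStr? (String.ofList [c])).getD 0
      di_num + rad_num * radix ^ (strlen - 1 - i).toNat) 0

-- ===== PORT B =====
def trans2num_alt (radix : Int) (number : String) : Int :=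
  number.toList.foldl
    (fun di_num c =>
      di_num * radix + (if c ≤ '9' then (c.toNat : Int) - 48 else (c.toNat : Int) - 87)) 0

-- ===== PRECONDITION & SPEC =====
-- Pre_ excludes strings with any char other than '0'-'9'/'a'-'j': there A raises
-- (ValueError from int(), or TypeError via getradnum returning None).
def Pre_trans2num (radix : Int) (number : String) : Prop :=
  (number.toList.all (fun c => ('0' ≤ c && c ≤ '9') || ('a' ≤ c && c ≤ 'j'))) = true
instance (radix : Int) (number : String) : Decidable (Pre_trans2num radix number) := by
  unfold Pre_trans2num; infer_instance

def pvWitness_trans2num : Int × String := (2, "10a")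

def Spec_trans2num (radix : Int) (number : String) (out : Int) : Prop := out = trans2num_alt radix number
instance (radix : Int) (number : String) (out : Int) : Decidable (Spec_trans2num radix number out) := by unfold Spec_trans2num; infer_instance

-- ===== CLAIM (what is proved, stated in full; the proofs are below) =====
def Claim_equal_trans2num : Prop := ∀ (radix : Int) (number : String), Dom_trans2num radix number → Pre_trans2num radix number → Spec_trans2num radix number (trans2num radix number)

-- ===== LEMMAS AND PROOFS =====

-- Horner accumulator shift
theorem horner_shift (d : Char → Int) (r : Int) (cs : List Char) :
    ∀ a : Int, cs.foldl (fun x c => x * r + d c) a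
      = a * r ^ cs.length + cs.foldl (fun x c => x * r + d c) 0 := by
  induction cs with
  | nil => intro a; simp
  | cons c t ih =>
    intro a
    simp only [List.foldl_cons, List.length_cons]
    rw [ih (a * r + d c), ih (0 * r + d c)]
    ring

-- A's positional sum over enumerate equals the Horner fold
theorem enum_fold_eq_horner (d : Char → Int) (r : Int) (n : Int) :
    ∀ (cs : List Char) (s acc : Int), s + cs.length = n →
      (PySem.List.enumerate cs s).foldl
          (fun a p => a + d p.2 * r ^ (n - 1 - p.1).toNat) acc
        = acc + cs.foldl (fun x c => x * r + d c) 0 := by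
  intro cs
  induction cs with
  | nil => intro s acc h; simp [PySem.List.enumerate]
  | cons c t ih =>
    intro s acc h
    rw [PySem.List.enumerate_cons, List.foldl_cons,
        ih (s + 1) _ (by simp only [List.length_cons] at h; push_cast at h ⊢; omega)]
    have hexp : (n - 1 - s).toNat = t.length := by
      simp only [List.length_cons] at h; push_cast at h; omega
    rw [hexp, List.foldl_cons, horner_shift d r t (0 * r + d c)]
    ring

-- the two digit functions agree on the chars Pre_ admits
theorem digit_eq (c : Char)
    (h : (('0' ≤ c && c ≤ '9') || ('a' ≤ c && c ≤ 'j')) = true) :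
    (if 'a' ≤ c ∧ c < 'z' then getradnum c
     else (PySem.Int.ofStr? (String.ofList [c])).getD 0)
      = (if c ≤ '9' then (c.toNat : Int) - 48 else (c.toNat : Int) - 87) := by
  have hb : (48 ≤ c.toNat ∧ c.toNat ≤ 57) ∨ (97 ≤ c.toNat ∧ c.toNat ≤ 106) := by
    simp only [Bool.or_eq_true, Bool.and_eq_true, decide_eq_true_eq,
      Char.le_def, UInt32.le_iff_toNat_le] at h
    exact h
  have hc : Char.ofNat c.toNat = c := Char.ofNat_toNat c
  rw [← hc]
  rcases hb with ⟨h1, h2⟩ | ⟨h1, h2⟩ <;> interval_cases c.toNat <;> decide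

-- ===== VERDICT (by name: the statement is the Claim_ definition above) =====
theorem trans2num_spec : Claim_equal_trans2num := by
  intro radix number _ hpre
  unfold Spec_trans2num trans2num trans2num_alt
  have h := enum_fold_eq_horner
      (fun c => if 'a' ≤ c ∧ c < 'z' then getradnum c
                else (PySem.Int.ofStr? (String.ofList [c])).getD 0)
      radix ((number.toList.length : Int)) number.toList 0 0 (by simp)
  rw [PySem.List.enumerate_eq_map_pyRange number.toList ' ',
      List.foldl_map] at h
  simp only [zero_add, PySem.List.len_eq] at h
  simp only [PySem.List.len_eq]
  rw [h]
  apply PySem.List.foldl_congr_mem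
  intro acc c hc
  rw [digit_eq c (by
    unfold Pre_trans2num at hpre
    exact List.all_eq_true.mp hpre c hc)]
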